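-- pv_equiv track=rewrite | github.com/SEOKJUN-KO/CodingTest | Python/Else/[3차] n진수 게임.py | solution
-- ===== SOURCE A (Python) =====
-- def remain(n):
--     if n <= 9: return str(n)
--     else:
--         if n == 10: return "A"
--         if n == 11: return "B"
--         if n == 12: return "C"
--         if n == 13: return "D"
--         if n == 14: return "E"
--         if n == 15: return "F"
--
-- def makeStr(N, n): #log
--     r = ""
--     while( N >= n):
--         r += remain(N%n)
--         N = N//n
--         if N < n:
--             r += remain(N)
--     if r == "":
--         r += remain(N%n)
--     return r[::-1]
--
-- def solution(n, t, m, p):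
--     ans = ''
--     i = 0
--     tmp, cnt = "", 0
--     while(cnt < t):
--         r = makeStr(i, n)
--         tmp += r
--         if len(tmp) >= m:
--             ans += tmp[p-1]
--             tmp = tmp[m:]
--             cnt += 1
--         i += 1
--     return ans
-- ===== SOURCE B (Python) =====
-- def solution(n, t, m, p):
--     # B: generate the full digit sequence prefix once, then read the p-th
--     # column of each m-block by strided indexing (no rolling buffer).
--     digits = "0123456789ABCDEF"
--
--     def rep(i):
--         if i == 0:
--             return "0"
--         r = ""
--         while i > 0:
--             r = digits[i % n] + r
--             i //= n
--         return r
--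
--     idxs = [p - 1 + k * m for k in range(t)]
--     need = idxs[-1] + 1 if idxs else 0
--     s, i = "", 0
--     while len(s) < need:
--         s += rep(i)
--         i += 1
--     return ''.join(s[j] for j in idxs)
-- ===== Notes on version B (the rewrite author's own statement) =====
-- stated objective: simpler
-- what changed: B replaces A's stateful rolling buffer (append each base-n number, conditionally pick tmp[p-1], slice off m chars, count) by a generate-then-index decomposition: build the digit-sequence prefix once, then read player p's digits by strided indexing s[p-1+k*m].
-- outside the precondition, e.g. on solution(2, 2, 2, 0): A returns '10', B returns '11'; on solution(18, 1, 1, 1): A returns '0', B returns '0'; on solution(2, 1, 3, 4): A returns '0', B returns '0'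
import Mathlib
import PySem

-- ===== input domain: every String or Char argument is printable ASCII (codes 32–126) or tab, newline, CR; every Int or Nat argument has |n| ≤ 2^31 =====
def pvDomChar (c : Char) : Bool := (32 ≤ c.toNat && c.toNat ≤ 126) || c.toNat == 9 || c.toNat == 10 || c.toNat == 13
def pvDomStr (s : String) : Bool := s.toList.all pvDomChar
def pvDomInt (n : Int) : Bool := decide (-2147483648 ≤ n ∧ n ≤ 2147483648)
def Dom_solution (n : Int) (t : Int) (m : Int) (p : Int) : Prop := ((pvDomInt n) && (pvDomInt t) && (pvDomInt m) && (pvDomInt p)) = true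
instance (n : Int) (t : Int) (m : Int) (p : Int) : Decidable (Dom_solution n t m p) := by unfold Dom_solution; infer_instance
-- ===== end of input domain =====

-- B replaces A's rolling buffer (append, pick tmp[p-1], slice off m) by generating the
-- digit-sequence prefix once and reading it with strided indexing; objective: simpler decomposition.

-- ===== PORT A =====

-- remain(n): Python returns None for n ≥ 16 (the caller then raises); that case is outside
-- Pre_solution, here it returns [] .
def remainA (d : Int) : List Char :=
  if d ≤ 9 then (PySem.Int.toStr d).toList
  else if d = 10 then ['A']
  else if d = 11 then ['B']
  else if d = 12 then ['C']
  else if d = 13 then ['D']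
  else if d = 14 then ['E']
  else if d = 15 then ['F']
  else []

-- the while-loop of makeStr; fuel only makes it total (N//n strictly decreases for n ≥ 2)
def makeLoopA : Nat → Int → Int → List Char → List Char
  | 0, _, _, r => r
  | f + 1, N, n, r =>
    if n ≤ N then
      let r1 := r ++ remainA (PySem.Int.mod N n)
      let N1 := PySem.Int.floordiv N n
      let r2 := if N1 < n then r1 ++ remainA N1 else r1
      makeLoopA f N1 n r2
    else r

def makeStrA (N n : Int) : List Char :=
  let r := makeLoopA (N.toNat + 1) N n []
  let r := if r = [] then r ++ remainA (PySem.Int.mod N n) else r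
  r.reverse

-- the while-loop of solution; fuel only makes it total (cnt reaches t after at most t*m steps)
def solLoopA : Nat → Int → Int → Int → Int → Int → List Char → Int → List Char → List Char
  | 0, _, _, _, _, _, _, _, ans => ans
  | f + 1, n, t, m, p, i, tmp, cnt, ans =>
    if cnt < t then
      let r := makeStrA i n
      let tmp1 := tmp ++ r
      if m ≤ (tmp1.length : Int) then
        -- tmp1[p-1]: raises outside Pre_solution; the default is never used inside it
        let ch := (PySem.List.pyGet? tmp1 (p - 1)).getD ' '
        solLoopA f n t m p (i + 1) (PySem.List.slice tmp1 (some m) none) (cnt + 1) (ans ++ [ch])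
      else
        solLoopA f n t m p (i + 1) tmp1 cnt ans
    else ans

def solution (n : Int) (t : Int) (m : Int) (p : Int) : String :=
  String.ofList (solLoopA (t.toNat * m.toNat + 1) n t m p 0 [] 0 [])

-- ===== PORT B =====

def digitsB : List Char := ['0','1','2','3','4','5','6','7','8','9','A','B','C','D','E','F']

-- rep's while-loop; fuel only makes it total (i//n strictly decreases for n ≥ 2)
def repLoopB : Nat → Int → Int → List Char → List Char
  | 0, _, _, r => r
  | f + 1, n, i, r =>
    if 0 < i then
      -- digits[i % n]: raises outside Pre_solution; the default is never used inside it
      repLoopB f n (PySem.Int.floordiv i n) ((PySem.List.pyGet? digitsB (PySem.Int.mod i n)).getD ' ' :: r)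
    else r

def repB (n i : Int) : List Char :=
  if i = 0 then ['0'] else repLoopB (i.toNat + 1) n i []

-- the prefix-building while-loop; fuel only makes it total (each rep adds ≥ 1 char)
def buildLoopB : Nat → Int → Int → List Char → Int → List Char
  | 0, _, _, s, _ => s
  | f + 1, n, need, s, i =>
    if (s.length : Int) < need then buildLoopB f n need (s ++ repB n i) (i + 1) else s

def solution_alt (n : Int) (t : Int) (m : Int) (p : Int) : String :=
  let idxs := (PySem.List.pyRange 0 t 1).map (fun k => p - 1 + k * m)
  let need := match idxs.getLast? with | some j => j + 1 | none => 0
  let s := buildLoopB (need.toNat + 1) n need [] 0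
  String.ofList (idxs.map (fun j => (PySem.List.pyGet? s j).getD ' '))

-- ===== PRECONDITION & SPEC =====
-- Pre_ excludes n outside 2..16 (A loops forever for n ≤ 1 or raises TypeError once a digit
-- beyond 15 is needed; for n > 16 only degenerate short runs return at all) and, when t ≥ 1,
-- p outside 1..m (A's value then relies on Python negative-index wraparound into its rolling
-- buffer, or on an IndexError).
def Pre_solution (n : Int) (t : Int) (m : Int) (p : Int) : Prop :=
  t ≤ 0 ∨ (2 ≤ n ∧ n ≤ 16 ∧ 1 ≤ p ∧ p ≤ m)
instance (n : Int) (t : Int) (m : Int) (p : Int) : Decidable (Pre_solution n t m p) := by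
  unfold Pre_solution; infer_instance

def pvWitness_solution : Int × Int × Int × Int := (2, 4, 2, 1)

def Spec_solution (n : Int) (t : Int) (m : Int) (p : Int) (out : String) : Prop := out = solution_alt n t m p
instance (n : Int) (t : Int) (m : Int) (p : Int) (out : String) : Decidable (Spec_solution n t m p out) := by unfold Spec_solution; infer_instance

-- ===== CLAIM (what is proved, stated in full; the proofs are below) =====
def Claim_equal_solution : Prop := ∀ (n : Int) (t : Int) (m : Int) (p : Int), Dom_solution n t m p → Pre_solution n t m p → Spec_solution n t m p (solution n t m p)

-- ===== LEMMAS AND PROOFS =====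

-- canonical base-nn digit string (proof-side spec shared by both ports)
def dig (N : Nat) : Char := digitsB.getD N ' '

def canonF : Nat → Nat → Nat → List Char
  | 0, _, _ => []
  | f + 1, nn, N => if N < nn then [dig N] else canonF f nn (N / nn) ++ [dig (N % nn)]

def canon (nn N : Nat) : List Char := canonF (N + 1) nn N

lemma canonF_irrel (nn : Nat) (h2 : 2 ≤ nn) :
    ∀ N f g, N < f → N < g → canonF f nn N = canonF g nn N := by
  intro N
  induction N using Nat.strong_induction_on with
  | _ N ih =>
    intro f g hf hg
    match f, g with
    | f + 1, g + 1 =>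
      simp only [canonF]
      split
      · rfl
      · rename_i hN
        have hlt : N / nn < N := Nat.div_lt_self (by omega) (by omega)
        rw [ih (N / nn) hlt (f) (g) (by omega) (by omega)]

lemma canon_unfold (nn N : Nat) (h2 : 2 ≤ nn) :
    canon nn N = if N < nn then [dig N] else canon nn (N / nn) ++ [dig (N % nn)] := by
  show canonF (N + 1) nn N = _
  simp only [canonF]
  split
  · rfl
  · rename_i hN
    rw [canonF_irrel nn h2 (N / nn) N (N / nn + 1)
      (Nat.div_lt_self (by omega) (by omega)) (by omega)]
    rfl

lemma canon_ne_nil (nn N : Nat) (h2 : 2 ≤ nn) : canon nn N ≠ [] := by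
  rw [canon_unfold nn N h2]; split <;> simp

lemma canon_len_pos (nn N : Nat) (h2 : 2 ≤ nn) : 1 ≤ (canon nn N).length := by
  have := canon_ne_nil nn N h2
  cases h : canon nn N with
  | nil => exact absurd h this
  | cons a l => simp

lemma remainA_eq (d : Nat) (hd : d < 16) : remainA (d : Int) = [dig d] := by
  interval_cases d <;> decide

lemma digitsB_get (d : Nat) (hd : d < 16) :
    (PySem.List.pyGet? digitsB (d : Int)).getD ' ' = dig d := by
  interval_cases d <;> decide

lemma makeLoopA_spec (nn : Nat) (h2 : 2 ≤ nn) (h16 : nn ≤ 16) :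
    ∀ N, ∀ f, ∀ r : List Char, N < f →
      makeLoopA f (N : Int) (nn : Int) r =
        if nn ≤ N then r ++ (canon nn N).reverse else r := by
  intro N
  induction N using Nat.strong_induction_on with
  | _ N ih =>
    intro f r hf
    cases f with
    | zero => omega
    | succ f =>
      simp only [makeLoopA]
      by_cases hN : nn ≤ N
      · have hm : N % nn < nn := Nat.mod_lt _ (by omega)
        have hqlt : N / nn < N := Nat.div_lt_self (by omega) (by omega)
        rw [if_pos (show (nn : Int) ≤ (N : Int) by exact_mod_cast hN)]
        simp only [PySem.Int.mod_natCast, PySem.Int.floordiv_natCast,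
          remainA_eq (N % nn) (by omega)]
        conv_rhs => rw [if_pos hN, canon_unfold nn N h2, if_neg (show ¬ N < nn by omega)]
        by_cases hq : N / nn < nn
        · rw [if_pos (show ((N / nn : Nat) : Int) < (nn : Int) by exact_mod_cast hq),
            remainA_eq (N / nn) (by omega),
            ih (N / nn) hqlt f _ (by omega), if_neg (show ¬ nn ≤ N / nn by omega)]
          conv_rhs => rw [canon_unfold nn (N / nn) h2, if_pos hq]
          simp
        · rw [if_neg (show ¬ ((N / nn : Nat) : Int) < (nn : Int) by exact_mod_cast hq),
            ih (N / nn) hqlt f _ (by omega), if_pos (show nn ≤ N / nn by omega)]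
          simp
      · rw [if_neg (show ¬ (nn : Int) ≤ (N : Int) by exact_mod_cast hN), if_neg hN]

lemma makeStrA_eq (nn N : Nat) (h2 : 2 ≤ nn) (h16 : nn ≤ 16) :
    makeStrA (N : Int) (nn : Int) = canon nn N := by
  unfold makeStrA
  have htn : ((N : Int)).toNat = N := by omega
  rw [htn, makeLoopA_spec nn h2 h16 N (N + 1) [] (by omega)]
  by_cases hN : nn ≤ N
  · rw [if_pos hN]
    have hne : (canon nn N).reverse ≠ [] := by
      simp [canon_ne_nil nn N h2]
    simp [hne]
  · rw [if_neg hN]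
    have hNm : N % nn = N := Nat.mod_eq_of_lt (by omega)
    simp only [List.nil_append, PySem.Int.mod_natCast, hNm,
      remainA_eq N (by omega), reduceIte]
    conv_rhs => rw [canon_unfold nn N h2, if_pos (show N < nn by omega)]
    simp

lemma repLoopB_spec (nn : Nat) (h2 : 2 ≤ nn) (h16 : nn ≤ 16) :
    ∀ i, ∀ f, ∀ r : List Char, 0 < i → i < f →
      repLoopB f (nn : Int) (i : Int) r = canon nn i ++ r := by
  intro i
  induction i using Nat.strong_induction_on with
  | _ i ih =>
    intro f r hi hf
    cases f with
    | zero => omega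
    | succ f =>
      simp only [repLoopB]
      rw [if_pos (show (0 : Int) < (i : Int) by exact_mod_cast hi)]
      have hm : i % nn < nn := Nat.mod_lt _ (by omega)
      simp only [PySem.Int.mod_natCast, PySem.Int.floordiv_natCast,
        digitsB_get (i % nn) (by omega)]
      by_cases hq : 0 < i / nn
      · have hqlt : i / nn < i := Nat.div_lt_self (by omega) (by omega)
        rw [ih (i / nn) hqlt f _ hq (by omega)]
        have hge : ¬ i < nn := by
          intro hlt
          have : i / nn = 0 := Nat.div_eq_of_lt hlt
          omega
        rw [canon_unfold nn i h2, if_neg hge]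
        simp
      · have hilt : i < nn := by
          by_contra hge
          have : 1 ≤ i / nn := (Nat.one_le_div_iff (by omega)).mpr (by omega)
          omega
        have hq0 : i / nn = 0 := Nat.div_eq_of_lt hilt
        rw [hq0]
        cases f with
        | zero => omega
        | succ f =>
          simp only [repLoopB, Nat.cast_zero]
          rw [if_neg (by omega)]
          rw [canon_unfold nn i h2, if_pos hilt, Nat.mod_eq_of_lt hilt]
          rfl

lemma repB_eq (nn i : Nat) (h2 : 2 ≤ nn) (h16 : nn ≤ 16) :
    repB (nn : Int) (i : Int) = canon nn i := by
  unfold repB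
  cases i with
  | zero =>
    rw [show ((0 : Nat) : Int) = 0 by norm_num, if_pos rfl,
      canon_unfold nn 0 h2, if_pos (by omega)]
    rfl
  | succ i =>
    rw [if_neg (show ¬ ((i + 1 : Nat) : Int) = 0 by omega)]
    have htn : ((i + 1 : Nat) : Int).toNat = i + 1 := by omega
    rw [htn]
    simpa using repLoopB_spec nn h2 h16 (i + 1) (i + 2) [] (by omega) (by omega)

-- the infinite digit sequence, as prefixes
def seqS (nn j : Nat) : List Char := (List.range j).flatMap (fun i => canon nn i)

lemma seqS_succ (nn j : Nat) : seqS nn (j + 1) = seqS nn j ++ canon nn j := by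
  simp [seqS, List.range_succ]

lemma len_seqS (nn j : Nat) (h2 : 2 ≤ nn) : j ≤ (seqS nn j).length := by
  induction j with
  | zero => simp [seqS]
  | succ j ih =>
    rw [seqS_succ]
    have := canon_len_pos nn j h2
    simp only [List.length_append]
    omega

lemma seqS_prefix (nn : Nat) {i j : Nat} (h : i ≤ j) : seqS nn i <+: seqS nn j := by
  induction j with
  | zero => 
    have : i = 0 := by omega
    simp [this]
  | succ j ih =>
    rcases Nat.lt_or_ge i (j + 1) with hlt | hge
    · have := ih (by omega)
      rw [seqS_succ]
      exact this.trans (List.prefix_append _ _)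
    · have : i = j + 1 := by omega
      simp [this]

def seqG (nn idx : Nat) : Char := (seqS nn (idx + 1)).getD idx ' '

lemma getD_prefix {l₁ l₂ : List Char} (h : l₁ <+: l₂) {idx : Nat}
    (hLen : idx < l₁.length) : l₂.getD idx ' ' = l₁.getD idx ' ' := by
  obtain ⟨tl, rfl⟩ := h
  rw [List.getD_append _ _ _ _ hLen]

lemma getD_seqS (nn j idx : Nat) (h2 : 2 ≤ nn) (h : idx < (seqS nn j).length) :
    (seqS nn j).getD idx ' ' = seqG nn idx := by
  rcases Nat.le_total j (idx + 1) with hle | hle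
  · exact (getD_prefix (seqS_prefix nn hle) h).symm
  · exact getD_prefix (seqS_prefix nn hle)
      (by have := len_seqS nn (idx + 1) h2; omega)

def picksFrom (nn mm pp tt c : Nat) : List Char :=
  (List.range (tt - c)).map (fun k => seqG nn ((c + k) * mm + (pp - 1)))

lemma picksFrom_cons (nn mm pp tt c : Nat) (hc : c < tt) :
    picksFrom nn mm pp tt c
      = seqG nn (c * mm + (pp - 1)) :: picksFrom nn mm pp tt (c + 1) := by
  unfold picksFrom
  rw [show tt - c = (tt - (c + 1)) + 1 by omega, List.range_succ_eq_map]
  simp only [List.map_cons, List.map_map, Nat.add_zero]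
  congr 1
  apply List.map_congr_left
  intro k _
  simp only [Function.comp_apply]
  have h : c + Nat.succ k = c + 1 + k := by omega
  rw [h]

lemma picksFrom_self (nn mm pp tt : Nat) : picksFrom nn mm pp tt tt = [] := by
  simp [picksFrom]

lemma solLoopA_spec (nn mm pp tt : Nat) (h2 : 2 ≤ nn) (h16 : nn ≤ 16)
    (hp1 : 1 ≤ pp) (hpm : pp ≤ mm) :
    ∀ f c i, ∀ tmp ans : List Char,
      c ≤ tt →
      tmp = (seqS nn i).drop (c * mm) →
      c * mm ≤ (seqS nn i).length →
      (tt - c) * mm + 1 ≤ f + min tmp.length (mm - 1) →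
      solLoopA f (nn : Int) (tt : Int) (mm : Int) (pp : Int) (i : Int) tmp (c : Int) ans
        = ans ++ picksFrom nn mm pp tt c := by
  intro f
  induction f with
  | zero =>
    intro c i tmp ans hc htmp hlen hfuel
    have hceq : c = tt := by
      by_contra hne
      have hsplit : (tt - c) * mm = (tt - (c + 1)) * mm + mm := by
        rw [show tt - c = (tt - (c + 1)) + 1 by omega]; ring
      have hmin := Nat.min_le_right tmp.length (mm - 1)
      omega
    subst hceq
    simp [solLoopA, picksFrom_self]
  | succ f ih =>
    intro c i tmp ans hc htmp hlen hfuel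
    simp only [solLoopA]
    by_cases hct : c < tt
    · rw [if_pos (show (c : Int) < (tt : Int) by exact_mod_cast hct)]
      have hr : makeStrA (i : Int) (nn : Int) = canon nn i := makeStrA_eq nn i h2 h16
      have hlenS : (seqS nn (i + 1)).length = (seqS nn i).length + (canon nn i).length := by
        rw [seqS_succ]; simp
      have hcp := canon_len_pos nn i h2
      have htmp1 : tmp ++ makeStrA (i : Int) (nn : Int) = (seqS nn (i + 1)).drop (c * mm) := by
        rw [htmp, hr, seqS_succ, List.drop_append_of_le_length hlen]
      have hlen1 : (tmp ++ makeStrA (i : Int) (nn : Int)).length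
          = (seqS nn (i + 1)).length - c * mm := by
        rw [htmp1, List.length_drop]
      have hleni : tmp.length = (seqS nn i).length - c * mm := by
        rw [htmp, List.length_drop]
      have hsplit : (tt - c) * mm = (tt - (c + 1)) * mm + mm := by
        rw [show tt - c = (tt - (c + 1)) + 1 by omega]; ring
      have hc1mm : (c + 1) * mm = c * mm + mm := by ring
      by_cases hm : mm ≤ (tmp ++ makeStrA (i : Int) (nn : Int)).length
      · rw [if_pos (show (mm : Int) ≤ ((tmp ++ makeStrA (i : Int) (nn : Int)).length : Int) by
          exact_mod_cast hm)]
        have hidxlt : c * mm + (pp - 1) < (seqS nn (i + 1)).length := by omega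
        have hget : (PySem.List.pyGet? (tmp ++ makeStrA (i : Int) (nn : Int))
            ((pp : Int) - 1)).getD ' ' = seqG nn (c * mm + (pp - 1)) := by
          rw [show ((pp : Int) - 1) = ((pp - 1 : Nat) : Int) by omega,
            PySem.List.pyGet?_natCast, ← List.getD_eq_getElem?_getD, htmp1,
            List.getD_eq_getElem?_getD, List.getElem?_drop,
            ← List.getD_eq_getElem?_getD,
            getD_seqS nn (i + 1) (c * mm + (pp - 1)) h2 hidxlt]
        have hslice : PySem.List.slice (tmp ++ makeStrA (i : Int) (nn : Int))
            (some (mm : Int)) none = (seqS nn (i + 1)).drop ((c + 1) * mm) := by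
          rw [PySem.List.slice_from_natCast, htmp1, List.drop_drop]
          congr 1
          ring
        rw [hget, hslice,
          show ((i : Int) + 1) = ((i + 1 : Nat) : Int) by omega,
          show ((c : Int) + 1) = ((c + 1 : Nat) : Int) by omega]
        rw [ih (c + 1) (i + 1) _ (ans ++ [seqG nn (c * mm + (pp - 1))]) (by omega) rfl
          (by omega)
          (by
            have hmin := Nat.min_le_right ((seqS nn (i + 1)).drop ((c + 1) * mm)).length (mm - 1)
            have hmin2 := Nat.min_le_right tmp.length (mm - 1)
            omega)]
        rw [picksFrom_cons nn mm pp tt c hct]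
        simp
      · rw [if_neg (show ¬ (mm : Int) ≤ ((tmp ++ makeStrA (i : Int) (nn : Int)).length : Int) by
          exact_mod_cast hm)]
        rw [show ((i : Int) + 1) = ((i + 1 : Nat) : Int) by omega]
        apply ih c (i + 1) _ ans hc htmp1 (by omega)
        have hmin1 : min (tmp ++ makeStrA (i : Int) (nn : Int)).length (mm - 1)
            = (tmp ++ makeStrA (i : Int) (nn : Int)).length :=
          Nat.min_eq_left (by omega)
        have hmin2 := Nat.min_le_left tmp.length (mm - 1)
        have hgrow : tmp.length + 1 ≤ (tmp ++ makeStrA (i : Int) (nn : Int)).length := by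
          rw [List.length_append, hr]; omega
        omega
    · rw [if_neg (show ¬ (c : Int) < (tt : Int) by exact_mod_cast hct)]
      have : c = tt := by omega
      subst this
      simp [picksFrom_self]

lemma buildLoopB_spec (nn : Nat) (h2 : 2 ≤ nn) (h16 : nn ≤ 16) (need : Int) :
    ∀ f i, ∀ s : List Char, s = seqS nn i →
      need.toNat ≤ f + s.length →
      ∃ j, buildLoopB f (nn : Int) need s (i : Int) = seqS nn j ∧
        need ≤ ((seqS nn j).length : Int) := by
  intro f
  induction f with
  | zero =>
    intro i s hs hf
    subst hs
    exact ⟨i, rfl, by omega⟩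
  | succ f ih =>
    intro i s hs hf
    simp only [buildLoopB]
    by_cases hlt : (s.length : Int) < need
    · rw [if_pos hlt, show ((i : Int) + 1) = ((i + 1 : Nat) : Int) by omega]
      apply ih (i + 1)
      · rw [hs, repB_eq nn i h2 h16, seqS_succ]
      · have := canon_len_pos nn i h2
        rw [List.length_append, repB_eq nn i h2 h16]
        omega
    · rw [if_neg hlt]
      exact ⟨i, hs, by rw [← hs]; omega⟩

lemma seqS_zero (nn : Nat) : seqS nn 0 = [] := by simp [seqS]

lemma solution_eq_picks (n t m p : Int) (h2 : 2 ≤ n) (h16 : n ≤ 16)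
    (hp1 : 1 ≤ p) (hpm : p ≤ m) (ht : 1 ≤ t) :
    solution n t m p
      = String.ofList (picksFrom n.toNat m.toNat p.toNat t.toNat 0) := by
  unfold solution
  have hn : n = (n.toNat : Int) := by omega
  have ht' : t = (t.toNat : Int) := by omega
  have hm' : m = (m.toNat : Int) := by omega
  have hp' : p = (p.toNat : Int) := by omega
  rw [hn, ht', hm', hp', show (0 : Int) = ((0 : Nat) : Int) by norm_num]
  simp only [Int.toNat_natCast]
  rw [solLoopA_spec n.toNat m.toNat p.toNat t.toNat (by omega) (by omega) (by omega)
    (by omega) (t.toNat * m.toNat + 1) 0 0 [] [] (by omega)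
    (by simp [seqS_zero]) (by rw [seqS_zero]; simp)
    (by simp)]
  simp

lemma solution_alt_eq_picks (n t m p : Int) (h2 : 2 ≤ n) (h16 : n ≤ 16)
    (hp1 : 1 ≤ p) (hpm : p ≤ m) (ht : 1 ≤ t) :
    solution_alt n t m p
      = String.ofList (picksFrom n.toNat m.toNat p.toNat t.toNat 0) := by
  simp only [solution_alt]
  have hn : n = (n.toNat : Int) := by omega
  have ht' : t = (t.toNat : Int) := by omega
  have hm' : m = (m.toNat : Int) := by omega
  have hp' : p = (p.toNat : Int) := by omega
  set nn := n.toNat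
  set tt := t.toNat
  set mm := m.toNat
  set pp := p.toNat
  have hidxs : (PySem.List.pyRange 0 t 1).map (fun k => p - 1 + k * m)
      = (List.range tt).map (fun k : Nat => ((k * mm + (pp - 1) : Nat) : Int)) := by
    rw [PySem.List.pyRange_one 0 t, show (t - 0).toNat = tt by omega, List.map_map]
    apply List.map_congr_left
    intro k _
    simp only [Function.comp_apply]
    have hcast : ((k * mm + (pp - 1) : Nat) : Int) = (k : Int) * (mm : Int) + (pp : Int) - 1 := by
      have h1 : ((pp - 1 : Nat) : Int) = (pp : Int) - 1 := by omega
      push_cast [h1]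
      ring
    rw [hm', hp', hcast]
    ring
  rw [hidxs]
  have htt : tt = (tt - 1) + 1 := by omega
  have hlast : ((List.range tt).map
      (fun k : Nat => ((k * mm + (pp - 1) : Nat) : Int))).getLast?
      = some (((tt - 1) * mm + (pp - 1) : Nat) : Int) := by
    rw [htt, List.range_succ, List.map_append]
    exact List.getLast?_concat
  rw [hlast]
  dsimp only
  obtain ⟨j, hbuild, hjlen⟩ := buildLoopB_spec nn (by omega) (by omega)
    ((((tt - 1) * mm + (pp - 1) : Nat) : Int) + 1)
    (((((tt - 1) * mm + (pp - 1) : Nat) : Int) + 1).toNat + 1) 0 [] (seqS_zero nn).symm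
    (by simp)
  rw [show ((0 : Nat) : Int) = 0 by norm_num, ← hn] at hbuild
  rw [hbuild]
  congr 1
  rw [List.map_map]
  unfold picksFrom
  rw [Nat.sub_zero]
  apply List.map_congr_left
  intro k hk
  simp only [Nat.zero_add]
  have hk' : k < tt := List.mem_range.mp hk
  have hmono : k * mm ≤ (tt - 1) * mm := Nat.mul_le_mul_right mm (by omega)
  have hidxlt : k * mm + (pp - 1) < (seqS nn j).length := by omega
  simp only [Function.comp_apply]
  rw [PySem.List.pyGet?_natCast, ← List.getD_eq_getElem?_getD,
    getD_seqS nn j (k * mm + (pp - 1)) (by omega) hidxlt]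

lemma both_empty (n t m p : Int) (ht : t ≤ 0) :
    solution n t m p = "" ∧ solution_alt n t m p = "" := by
  constructor
  · unfold solution
    have htn : t.toNat = 0 := by omega
    rw [htn]
    simp only [Nat.zero_mul]
    simp [solLoopA, show ¬ (0 : Int) < t by omega]
  · unfold solution_alt
    rw [PySem.List.pyRange_one_eq_nil (by omega)]
    simp [buildLoopB]


-- ===== VERDICT (by name: the statement is the Claim_ definition above) =====
theorem solution_spec : Claim_equal_solution := by
  unfold Claim_equal_solution
  intro n t m p hdom hpre
  unfold Spec_solution
  by_cases ht0 : t ≤ 0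
  · obtain ⟨hA, hB⟩ := both_empty n t m p ht0
    rw [hA, hB]
  · have hq : 2 ≤ n ∧ n ≤ 16 ∧ 1 ≤ p ∧ p ≤ m := by
      rcases hpre with h | h
      · omega
      · exact h
    obtain ⟨h2, h16, hp1, hpm⟩ := hq
    rw [solution_eq_picks n t m p h2 h16 hp1 hpm (by omega),
      solution_alt_eq_picks n t m p h2 h16 hp1 hpm (by omega)]
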